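-- pv_equiv track=rewrite | github.com/Ranjithkumar3005/python_programs | code/akash_dinner.py | check_min_time
-- ===== SOURCE A (Python) =====
-- def check_min_time(N, K, A, B):
--     category_min_time = {}
--     for i in range(N):
--         category = A[i]
--         time = B[i]
--         if category in category_min_time:
--             category_min_time[category] = min(category_min_time[category], time)
--         else:
--             category_min_time[category] = time
--
--     if len(category_min_time) < K:
--         return -1
--
--     min_times = sorted(category_min_time.values())
--
--     return sum(min_times[:K])
-- ===== SOURCE B (Python) =====
-- def check_min_time(N, K, A, B):
--     categories = {A[i] for i in range(N)}
--     if len(categories) < K: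
--         return -1
--     # each category occurs at least once among the first N entries, so min() never sees an empty sequence
--     minima = sorted(min(B[i] for i in range(N) if A[i] == c) for c in categories)
--     return sum(minima[:K])
-- ===== Notes on version B (the rewrite author's own statement) =====
-- stated objective: simpler
-- what changed: Replaces A's incrementally-updated dict of running minima by a set of categories plus a direct per-category min scan; Pre_ excludes only the inputs where A raises IndexError (N exceeding the length of A or B).
import Mathlib
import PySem

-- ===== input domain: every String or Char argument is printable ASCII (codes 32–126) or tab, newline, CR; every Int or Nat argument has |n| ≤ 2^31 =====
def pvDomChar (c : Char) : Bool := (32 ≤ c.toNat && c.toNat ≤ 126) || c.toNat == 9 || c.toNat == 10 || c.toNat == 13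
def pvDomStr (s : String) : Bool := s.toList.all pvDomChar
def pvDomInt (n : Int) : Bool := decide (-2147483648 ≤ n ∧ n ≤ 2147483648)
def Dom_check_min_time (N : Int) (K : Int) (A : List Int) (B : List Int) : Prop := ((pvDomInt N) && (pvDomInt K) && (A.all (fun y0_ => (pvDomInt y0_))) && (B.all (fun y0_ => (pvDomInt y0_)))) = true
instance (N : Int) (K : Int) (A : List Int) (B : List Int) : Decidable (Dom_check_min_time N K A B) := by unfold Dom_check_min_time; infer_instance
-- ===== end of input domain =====

-- B replaces A's running-min dictionary by a category set plus a direct per-category minimum scan (simpler decomposition, not faster).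

-- ===== PORT A =====
-- A: dict of per-category running minima built by indexing A[i], B[i] over range(N);
-- -1 if fewer than K categories, else sum of the K smallest minima (Python slice semantics kept for any K).
def check_min_time (N : Int) (K : Int) (A : List Int) (B : List Int) : Int :=
  let d : PySem.Dict Int Int := (PySem.List.pyRange 0 N 1).foldl (fun d i =>
      let category := PySem.List.pyGetD A i 0
      let time := PySem.List.pyGetD B i 0
      if d.contains category then d.insert category (min (d.getD category 0) time)
      else d.insert category time) PySem.Dict.empty
  if (d.size : Int) < K then -1
  else (PySem.List.slice (PySem.List.sorted d.values (fun x => x) false) none (some K)).sum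

-- ===== PORT B =====
-- B: the set of categories, then for each category the minimum of its times by a direct scan
-- (min() never sees an empty sequence — every category in the set occurs among the first N entries,
-- so the `.getD 0` default of min? is unreachable), then the same guard and K-smallest sum.
def check_min_time_alt (N : Int) (K : Int) (A : List Int) (B : List Int) : Int :=
  let categories : PySem.Set Int :=
    PySem.Set.ofList ((PySem.List.pyRange 0 N 1).map (fun i => PySem.List.pyGetD A i 0))
  if (categories.length : Int) < K then -1
  else
    let minima := PySem.List.sorted (categories.map (fun c =>
        (PySem.List.min? (((PySem.List.pyRange 0 N 1).filter
            (fun i => PySem.List.pyGetD A i 0 == c)).map (fun i => PySem.List.pyGetD B i 0))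
          (fun x => x)).getD 0)) (fun x => x) false
    (PySem.List.slice minima none (some K)).sum

-- ===== PRECONDITION & SPEC =====
-- Pre_ excludes exactly the inputs on which A raises IndexError: N larger than the length of A or of B.
def Pre_check_min_time (N : Int) (K : Int) (A : List Int) (B : List Int) : Prop :=
  N ≤ (A.length : Int) ∧ N ≤ (B.length : Int)
instance (N : Int) (K : Int) (A : List Int) (B : List Int) : Decidable (Pre_check_min_time N K A B) := by unfold Pre_check_min_time; infer_instance
def pvWitness_check_min_time : Int × Int × List Int × List Int := (3, 2, [1, 1, 2], [5, 3, 7])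

def Spec_check_min_time (N : Int) (K : Int) (A : List Int) (B : List Int) (out : Int) : Prop := out = check_min_time_alt N K A B
instance (N : Int) (K : Int) (A : List Int) (B : List Int) (out : Int) : Decidable (Spec_check_min_time N K A B out) := by unfold Spec_check_min_time; infer_instance

-- ===== CLAIM =====
def Claim_equal_check_min_time : Prop := ∀ (N : Int) (K : Int) (A : List Int) (B : List Int), Dom_check_min_time N K A B → Pre_check_min_time N K A B → Spec_check_min_time N K A B (check_min_time N K A B)

-- ===== LEMMAS AND PROOFS =====

-- A's loop body, abstracted over a (category, time) pair.
def pvStepA (d : PySem.Dict Int Int) (p : Int × Int) : PySem.Dict Int Int :=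
  if d.contains p.1 then d.insert p.1 (min (d.getD p.1 0) p.2) else d.insert p.1 p.2

-- running minimum on Option Int
def pvOMin (o : Option Int) (t : Int) : Option Int := some (o.elim t (fun v => min v t))

theorem pvStepA_eq : pvStepA = fun (d : PySem.Dict Int Int) (p : Int × Int) =>
    d.insert p.1 (if d.contains p.1 then min (d.getD p.1 0) p.2 else p.2) := by
  funext d p
  unfold pvStepA
  split <;> rfl

-- indexing the first n positions of A and B gives the zip of the takes
theorem pvZipMap (A B : List Int) (n : Nat) (hA : n ≤ A.length) (hB : n ≤ B.length) :
    (PySem.List.pyRange 0 (n : Int) 1).map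
        (fun i => (PySem.List.pyGetD A i 0, PySem.List.pyGetD B i 0))
      = (A.take n).zip (B.take n) := by
  induction n with
  | zero => simp
  | succ m ih =>
    have h1 : (0 : Int) ≤ (m : Int) := by positivity
    have h2 : ((m : Int)) ≤ (m : Int) + 1 := by omega
    have hr : PySem.List.pyRange 0 ((m : Int) + 1) 1
        = PySem.List.pyRange 0 (m : Int) 1 ++ [(m : Int)] :=
      PySem.List.pyRange_one_succ_right h1
    have hmA : m < A.length := by omega
    have hmB : m < B.length := by omega
    have hA' : A.take (m + 1) = A.take m ++ [A[m]] := by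
      rw [List.take_add_one]
      simp [List.getElem?_eq_getElem hmA]
    have hB' : B.take (m + 1) = B.take m ++ [B[m]] := by
      rw [List.take_add_one]
      simp [List.getElem?_eq_getElem hmB]
    have hlen : (A.take m).length = (B.take m).length := by
      simp [List.length_take]; omega
    have : ((m + 1 : Nat) : Int) = (m : Int) + 1 := by push_cast; ring
    rw [this, hr, List.map_append, ih (by omega) (by omega), hA', hB',
        List.zip_append hlen]
    simp [PySem.List.pyGetD_natCast, List.getD, List.getElem?_eq_getElem hmA,
          List.getElem?_eq_getElem hmB]

-- the lookup of c after folding A's step over a pair list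
theorem pvGetFold (ps : List (Int × Int)) (d : PySem.Dict Int Int) (c : Int) :
    (ps.foldl pvStepA d).get? c
      = ((ps.filter (fun p => p.1 == c)).map (·.2)).foldl pvOMin (d.get? c) := by
  induction ps generalizing d with
  | nil => rfl
  | cons p t ih =>
    rw [List.foldl_cons, ih]
    by_cases hc : p.1 = c
    · have hstep : (pvStepA d p).get? c = pvOMin (d.get? c) p.2 := by
        unfold pvStepA pvOMin
        rw [PySem.Dict.contains_eq_isSome_get?]
        cases h : d.get? c with
        | none => simp [hc, h, PySem.Dict.get?_insert_self]
        | some v =>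
          simp [hc, h, PySem.Dict.get?_insert_self,
                PySem.Dict.getD_eq_get?_getD]
      simp [hc, hstep]
    · have hstep : (pvStepA d p).get? c = d.get? c := by
        unfold pvStepA
        split <;> exact PySem.Dict.get?_insert_of_ne _ _ (Ne.symm hc)
      simp [hc, hstep]

theorem pvFoldOMin (l : List Int) (v : Int) :
    l.foldl pvOMin (some v) = some (l.foldl min v) := by
  induction l generalizing v with
  | nil => rfl
  | cons t ts ih => simp [List.foldl_cons, pvOMin, ih]

theorem pvMain (N K : Int) (A B : List Int)
    (hA : N ≤ (A.length : Int)) (hB : N ≤ (B.length : Int)) :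
    check_min_time N K A B = check_min_time_alt N K A B := by
  simp only [check_min_time, check_min_time_alt]
  set n := N.toNat with hn
  have hAn : n ≤ A.length := by omega
  have hBn : n ≤ B.length := by omega
  have hrange : PySem.List.pyRange 0 N 1 = PySem.List.pyRange 0 (n : Int) 1 := by
    by_cases h : 0 ≤ N
    · rw [hn, Int.toNat_of_nonneg h]
    · rw [PySem.List.pyRange_one_eq_nil (by omega), PySem.List.pyRange_one_eq_nil (by omega)]
  simp only [hrange]
  have hzip := pvZipMap A B n hAn hBn
  set ps := (A.take n).zip (B.take n) with hps
  -- A's index loop is the pair-list fold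
  have hfold : (PySem.List.pyRange 0 (n : Int) 1).foldl (fun (d : PySem.Dict Int Int) i =>
        if d.contains (PySem.List.pyGetD A i 0) then
          d.insert (PySem.List.pyGetD A i 0)
            (min (d.getD (PySem.List.pyGetD A i 0) 0) (PySem.List.pyGetD B i 0))
        else d.insert (PySem.List.pyGetD A i 0) (PySem.List.pyGetD B i 0)) PySem.Dict.empty
      = ps.foldl pvStepA PySem.Dict.empty := by
    rw [← hzip, List.foldl_map]; rfl
  -- B's category list is the pair-list's first components
  have hcat : (PySem.List.pyRange 0 (n : Int) 1).map (fun i => PySem.List.pyGetD A i 0)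
      = ps.map (·.1) := by
    rw [← hzip, List.map_map]; rfl
  -- B's per-category time list is the pair-list's filtered second components
  have hflt : ∀ c : Int, ((PySem.List.pyRange 0 (n : Int) 1).filter
        (fun i => PySem.List.pyGetD A i 0 == c)).map (fun i => PySem.List.pyGetD B i 0)
      = (ps.filter (fun p => p.1 == c)).map (·.2) := by
    intro c
    rw [← hzip, List.filter_map, List.map_map]; rfl
  rw [hfold]
  simp only [hcat, hflt]
  set d := ps.foldl pvStepA PySem.Dict.empty with hd
  have hkeys : d.keys = PySem.Set.ofList (ps.map (·.1)) := by
    rw [hd, pvStepA_eq, PySem.Dict.keys_foldl_insert_key ps Prod.fst _ PySem.Dict.empty]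
    rfl
  have hnd : d.keys.Nodup := by
    rw [hd, pvStepA_eq]
    exact PySem.Dict.nodup_keys_foldl_insert_key ps Prod.fst _ PySem.Dict.empty (by simp)
  have hval : ∀ c ∈ PySem.Set.ofList (ps.map (·.1)),
      d.getD c 0 = (PySem.List.min? ((ps.filter (fun p => p.1 == c)).map (·.2))
        (fun x => x)).getD 0 := by
    intro c hc
    rw [PySem.Dict.getD_eq_get?_getD, hd, pvGetFold]
    cases h : (ps.filter (fun p => p.1 == c)).map (·.2) with
    | nil =>
      exfalso
      rw [PySem.Set.mem_ofList] at hc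
      obtain ⟨p, hp, hpc⟩ := List.mem_map.mp hc
      have : p ∈ ps.filter (fun p => p.1 == c) := List.mem_filter.mpr ⟨hp, by simp [hpc]⟩
      have : p.2 ∈ (ps.filter (fun p => p.1 == c)).map (·.2) := List.mem_map_of_mem this
      rw [h] at this
      exact absurd this (List.not_mem_nil)
    | cons t ts =>
      have h0 : (PySem.Dict.empty : PySem.Dict Int Int).get? c = none := rfl
      rw [h0, List.foldl_cons]
      have h1 : pvOMin none t = some t := rfl
      rw [h1, pvFoldOMin, PySem.List.min?_id_cons]
  have hvalues : d.values = (PySem.Set.ofList (ps.map (·.1))).map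
      (fun c => (PySem.List.min? ((ps.filter (fun p => p.1 == c)).map (·.2))
        (fun x => x)).getD 0) := by
    rw [PySem.Dict.values_eq_map_keys d hnd 0, hkeys]
    exact List.map_congr_left hval
  have hsize : d.size = (PySem.Set.ofList (ps.map (·.1))).length := by
    have : d.size = d.keys.length := by
      simp [PySem.Dict.size, PySem.Dict.keys]
    rw [this, hkeys]
  rw [hvalues, hsize]

-- ===== VERDICT =====
theorem check_min_time_spec : Claim_equal_check_min_time := by
  intro N K A B _ hPre
  unfold Spec_check_min_time
  exact pvMain N K A B hPre.1 hPre.2
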